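-- pv_equiv track=rewrite | github.com/PregnantPenguins789/vps-pypi-place | watchdog/classifier.py | parse_dep_surface
-- ===== SOURCE A (Python) =====
-- _BUILD_SIGNALS = [
--     "building wheel", "error: command", "gcc", "clang", "rustc",
--     "cargo build", "failed building", "compilation error",
--     "cannot find", "No such file or directory", "linker",
-- ]
--
-- def _match(text: str, signals: list[str]) -> bool:
--     lowered = text.lower()
--     return any(s in lowered for s in signals)
--
-- def parse_dep_surface(pip_output: str) -> dict:
--     """
--     Parse 'pip install' stdout to extract dependency surface metrics.
--     Returns dict with dep_count, wheel_count, source_count, compile_triggered.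
--     """
--     lines = pip_output.lower()
--     dep_count   = 0
--     wheel_count = 0
--     source_count = 0
--     compile_triggered = 0
--
--     # "Successfully installed X-1.0 Y-2.0 ..."
--     for line in pip_output.splitlines():
--         if line.strip().startswith("Successfully installed"):
--             packages = line.replace("Successfully installed", "").strip().split()
--             dep_count = len(packages)
--
--     # Wheel vs source build counts
--     wheel_count       = pip_output.lower().count(".whl")
--     source_count      = pip_output.lower().count("building wheel")
--     compile_triggered = 1 if _match(pip_output, _BUILD_SIGNALS) else 0
--
--     return {
--         "dep_count":          dep_count,
--         "wheel_count":        wheel_count,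
--         "source_count":       source_count,
--         "compile_triggered":  compile_triggered,
--     }
-- ===== SOURCE B (Python) =====
-- _BUILD_SIGNALS = [
--     "building wheel", "error: command", "gcc", "clang", "rustc",
--     "cargo build", "failed building", "compilation error",
--     "cannot find", "No such file or directory", "linker",
-- ]
--
-- def parse_dep_surface(pip_output: str) -> dict:
--     dep_count = 0
--     wheel_count = 0
--     source_count = 0
--     compile_triggered = 0
--     # single pass: one traversal of the lines accumulates all four metrics
--     for line in pip_output.splitlines():
--         if line.strip().startswith("Successfully installed"):
--             dep_count = len(line.replace("Successfully installed", "").strip().split())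
--         lowered = line.lower()
--         wheel_count += lowered.count(".whl")
--         source_count += lowered.count("building wheel")
--         if any(s in lowered for s in _BUILD_SIGNALS):
--             compile_triggered = 1
--     return {
--         "dep_count": dep_count,
--         "wheel_count": wheel_count,
--         "source_count": source_count,
--         "compile_triggered": compile_triggered,
--     }
-- ===== Notes on version B (the rewrite author's own statement) =====
-- stated objective: alternative
-- what changed: B makes one fused pass over pip_output.splitlines(), accumulating all four metrics per line (per-line lowered counts of '.whl'/'building wheel' summed, compile flag latched, dep_count overwritten on each 'Successfully installed' line), replacing A's four separate whole-string scans; correct because none of the counted/matched substrings contains a line break, so whole-string counting equals the per-line sum.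
import Mathlib
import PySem

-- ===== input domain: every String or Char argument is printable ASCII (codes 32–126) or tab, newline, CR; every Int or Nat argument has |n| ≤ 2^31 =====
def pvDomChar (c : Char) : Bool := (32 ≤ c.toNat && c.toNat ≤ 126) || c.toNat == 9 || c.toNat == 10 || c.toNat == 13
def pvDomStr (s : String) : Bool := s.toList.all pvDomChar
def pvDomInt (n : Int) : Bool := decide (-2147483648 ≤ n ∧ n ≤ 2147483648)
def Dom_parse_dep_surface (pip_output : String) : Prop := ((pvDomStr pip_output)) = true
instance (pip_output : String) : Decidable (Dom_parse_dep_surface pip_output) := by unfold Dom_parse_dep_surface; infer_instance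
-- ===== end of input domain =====

-- B fuses A's four separate whole-string scans into one pass over splitlines, accumulating all four
-- metrics per line; objective: alternative (same cost, genuinely different traversal).


-- ===== PORT A =====
def pvBuildSignals : List String :=
  ["building wheel", "error: command", "gcc", "clang", "rustc",
   "cargo build", "failed building", "compilation error",
   "cannot find", "No such file or directory", "linker"]

-- _match(text, signals)
def pvMatch (text : String) (signals : List String) : Bool :=
  let lowered := PySem.Str.lower text
  signals.any (fun s => PySem.Str.isIn s lowered)

def parse_dep_surface (pip_output : String) : List (String × Int) :=
  let dep_count : Int :=
    (PySem.Str.splitlines pip_output).foldl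
      (fun dep line =>
        if PySem.Str.startswith (PySem.Str.strip line) "Successfully installed" then
          ((PySem.Str.split₀ (PySem.Str.strip
              (PySem.Str.replace line "Successfully installed" ""))).length : Int)
        else dep) 0
  let wheel_count : Int := (PySem.Str.count (PySem.Str.lower pip_output) ".whl" : Int)
  let source_count : Int := (PySem.Str.count (PySem.Str.lower pip_output) "building wheel" : Int)
  let compile_triggered : Int := if pvMatch pip_output pvBuildSignals then 1 else 0
  [("dep_count", dep_count), ("wheel_count", wheel_count),
   ("source_count", source_count), ("compile_triggered", compile_triggered)]

-- ===== PORT B =====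
-- Source B: one pass over splitlines, state (dep, wheel, source, flag) updated per line in Source B's order
def pvStep (st : Int × Int × Int × Int) (line : String) : Int × Int × Int × Int :=
  let st1 :=
    if PySem.Str.startswith (PySem.Str.strip line) "Successfully installed" then
      (((PySem.Str.split₀ (PySem.Str.strip
          (PySem.Str.replace line "Successfully installed" ""))).length : Int),
       st.2.1, st.2.2.1, st.2.2.2)
    else st
  let lowered := PySem.Str.lower line
  (st1.1,
   st1.2.1 + (PySem.Str.count lowered ".whl" : Int),
   st1.2.2.1 + (PySem.Str.count lowered "building wheel" : Int),
   if pvBuildSignals.any (fun s => PySem.Str.isIn s lowered) then 1 else st1.2.2.2)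

def parse_dep_surface_alt (pip_output : String) : List (String × Int) :=
  let r := (PySem.Str.splitlines pip_output).foldl pvStep (0, 0, 0, 0)
  [("dep_count", r.1), ("wheel_count", r.2.1),
   ("source_count", r.2.2.1), ("compile_triggered", r.2.2.2)]

-- ===== PRECONDITION & SPEC =====
def Spec_parse_dep_surface (pip_output : String) (out : List (String × Int)) : Prop := out = parse_dep_surface_alt pip_output
instance (pip_output : String) (out : List (String × Int)) : Decidable (Spec_parse_dep_surface pip_output out) := by unfold Spec_parse_dep_surface; infer_instance

-- ===== CLAIM =====
def Claim_equal_parse_dep_surface : Prop := ∀ (pip_output : String), Dom_parse_dep_surface pip_output → Spec_parse_dep_surface pip_output (parse_dep_surface pip_output)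

-- ===== LEMMAS AND PROOFS =====

-- the line-break test used by PySem.Chars.splitlines, transcribed
def pvIsB (c : Char) : Bool :=
  have n := c.toNat
  decide (n = 10) || decide (n = 13) || decide (n = 11) || decide (n = 12) || decide (n = 28) ||
    decide (n = 29) || decide (n = 30) || decide (n = 133) || decide (n = 8232) || decide (n = 8233)

theorem splitlines_eq_go (s : List Char) :
    PySem.Chars.splitlines s = PySem.Chars.splitlines.go pvIsB s [] [] := rfl

def pvSplit (s : List Char) : List (List Char) := PySem.Chars.splitlines.go pvIsB s [] []

-- prepend a (non-break) segment onto the first line of a splitlines result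
def pvPrepend (p : List Char) (ls : List (List Char)) : List (List Char) :=
  match ls with
  | [] => if p.isEmpty then [] else [p]
  | l :: ls' => (p ++ l) :: ls'

-- structural form of PySem.Chars.count for a nonempty needle a :: p
def pvCount (a : Char) (p : List Char) : List Char → Nat
  | [] => 0
  | c :: t =>
    if (a :: p).isPrefixOf (c :: t) then 1 + pvCount a p (List.drop p.length t)
    else pvCount a p t
termination_by s => s.length
decreasing_by
  all_goals simp

-- one-step unfoldings of splitlines.go
theorem go_nil (isB : Char → Bool) (cur : List Char) (acc : List (List Char)) :
    PySem.Chars.splitlines.go isB [] cur acc =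
      if cur.isEmpty then acc.reverse else (cur.reverse :: acc).reverse := rfl

theorem go_crlf (isB : Char → Bool) (rest cur : List Char) (acc : List (List Char)) :
    PySem.Chars.splitlines.go isB ('\r' :: '\n' :: rest) cur acc =
      PySem.Chars.splitlines.go isB rest [] (cur.reverse :: acc) := rfl

theorem go_cons (isB : Char → Bool) (c : Char) (rest cur : List Char) (acc : List (List Char))
    (h : c ≠ '\r' ∨ rest.head? ≠ some '\n') :
    PySem.Chars.splitlines.go isB (c :: rest) cur acc =
      if isB c then PySem.Chars.splitlines.go isB rest [] (cur.reverse :: acc)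
      else PySem.Chars.splitlines.go isB rest (c :: cur) acc := by
  rw [PySem.Chars.splitlines.go.eq_def]
  split
  · simp at *
  · rename_i heq
    injection heq with h1 h2
    subst h1; subst h2
    rcases h with h | h
    · exact absurd rfl h
    · simp at h
  · rename_i heq
    injection heq with h1 h2
    subst h1; subst h2
    rfl


theorem pvPrepend_nil (ls : List (List Char)) : pvPrepend [] ls = ls := by
  cases ls <;> simp [pvPrepend]

theorem pvPrepend_append (a b : List Char) (ls : List (List Char)) :
    pvPrepend (a ++ b) ls = pvPrepend a (pvPrepend b ls) := by
  cases ls with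
  | nil =>
    by_cases hb : b = [] <;> by_cases ha : a = [] <;> simp [pvPrepend, ha, hb]
  | cons l ls' => simp [pvPrepend]

-- characterization of splitlines.go: accumulator out front, current line prepended
theorem pvGo_eq (n : Nat) : ∀ s : List Char, s.length ≤ n → ∀ (cur : List Char) (acc : List (List Char)),
    PySem.Chars.splitlines.go pvIsB s cur acc = acc.reverse ++ pvPrepend cur.reverse (pvSplit s) := by
  induction n with
  | zero =>
    intro s hs cur acc
    have hnil : s = [] := by cases s with | nil => rfl | cons a t => simp at hs
    subst hnil
    cases hcur : cur with
    | nil => simp [go_nil, pvSplit, pvPrepend]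
    | cons x xs => simp [go_nil, pvSplit, pvPrepend]
  | succ n ih =>
    intro s hs cur acc
    cases s with
    | nil =>
      cases hcur : cur with
      | nil => simp [go_nil, pvSplit, pvPrepend]
      | cons x xs => simp [go_nil, pvSplit, pvPrepend]
    | cons c rest =>
      by_cases hcr : c = '\r' ∧ rest.head? = some '\n'
      · obtain ⟨hc, hh⟩ := hcr
        subst hc
        cases rest with
        | nil => simp at hh
        | cons d rest2 =>
          have hd : d = '\n' := by simpa using hh
          subst hd
          rw [go_crlf, ih rest2 (by simp at hs ⊢; omega)]
          have h2 : pvSplit ('\r' :: '\n' :: rest2) = [] :: pvSplit rest2 := by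
            show PySem.Chars.splitlines.go pvIsB _ [] [] = _
            rw [go_crlf, ih rest2 (by simp at hs ⊢; omega)]
            simp [pvPrepend_nil]
          rw [h2]
          cases pvSplit rest2 <;> simp [pvPrepend]
      · have h' : c ≠ '\r' ∨ rest.head? ≠ some '\n' := by tauto
        rw [go_cons _ _ _ _ _ h']
        by_cases hb : pvIsB c = true
        · rw [if_pos hb, ih rest (by simp at hs ⊢; omega)]
          have h2 : pvSplit (c :: rest) = [] :: pvSplit rest := by
            show PySem.Chars.splitlines.go pvIsB _ [] [] = _
            rw [go_cons _ _ _ _ _ h', if_pos hb, ih rest (by simp at hs ⊢; omega)]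
            simp [pvPrepend_nil]
          rw [h2]
          cases pvSplit rest <;> simp [pvPrepend]
        · rw [if_neg hb, ih rest (by simp at hs ⊢; omega)]
          have h2 : pvSplit (c :: rest) = pvPrepend [c] (pvSplit rest) := by
            show PySem.Chars.splitlines.go pvIsB _ [] [] = _
            rw [go_cons _ _ _ _ _ h', if_neg hb, ih rest (by simp at hs ⊢; omega)]
            simp [pvPrepend_nil]
          rw [h2, List.reverse_cons, pvPrepend_append]

theorem pvSplit_nil : pvSplit [] = [] := rfl

theorem pvSplit_crlf (rest : List Char) : pvSplit ('\r' :: '\n' :: rest) = [] :: pvSplit rest := by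
  show PySem.Chars.splitlines.go pvIsB _ [] [] = _
  rw [go_crlf, pvGo_eq rest.length rest le_rfl]
  simp [pvPrepend_nil]

theorem pvSplit_break (c : Char) (rest : List Char) (hb : pvIsB c = true)
    (h : c ≠ '\r' ∨ rest.head? ≠ some '\n') : pvSplit (c :: rest) = [] :: pvSplit rest := by
  show PySem.Chars.splitlines.go pvIsB _ [] [] = _
  rw [go_cons _ _ _ _ _ h, if_pos hb, pvGo_eq rest.length rest le_rfl]
  simp [pvPrepend_nil]

theorem pvIsB_cr : pvIsB '\r' = true := rfl

theorem pvSplit_cons (c : Char) (rest : List Char) (hb : pvIsB c = false) :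
    pvSplit (c :: rest) = pvPrepend [c] (pvSplit rest) := by
  have h' : c ≠ '\r' ∨ rest.head? ≠ some '\n' := by
    left; intro e; rw [e, pvIsB_cr] at hb; exact absurd hb (by simp)
  show PySem.Chars.splitlines.go pvIsB _ [] [] = _
  rw [go_cons _ _ _ _ _ h', if_neg (by simp [hb]), pvGo_eq rest.length rest le_rfl]
  simp [pvPrepend_nil]

theorem pvSplit_ne_nil (c : Char) (rest : List Char) : pvSplit (c :: rest) ≠ [] := by
  by_cases hb : pvIsB c = true
  · by_cases hcr : c = '\r' ∧ rest.head? = some '\n'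
    · obtain ⟨hc, hh⟩ := hcr
      subst hc
      cases rest with
      | nil => simp at hh
      | cons d r2 =>
        have hd : d = '\n' := by simpa using hh
        subst hd
        rw [pvSplit_crlf]; simp
    · rw [pvSplit_break c rest hb (by tauto)]; simp
  · rw [pvSplit_cons c rest (by simpa using hb)]
    cases pvSplit rest <;> simp [pvPrepend]

theorem pvSplit_first_prefix (n : Nat) : ∀ s : List Char, s.length ≤ n →
    ∀ l ls, pvSplit s = l :: ls → l <+: s := by
  induction n with
  | zero =>
    intro s hs l ls h
    have hnil : s = [] := by cases s with | nil => rfl | cons a t => simp at hs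
    subst hnil; rw [pvSplit_nil] at h; cases h
  | succ n ih =>
    intro s hs l ls h
    cases s with
    | nil => rw [pvSplit_nil] at h; cases h
    | cons c rest =>
      by_cases hb : pvIsB c = true
      · by_cases hcr : c = '\r' ∧ rest.head? = some '\n'
        · obtain ⟨hc, hh⟩ := hcr
          subst hc
          cases rest with
          | nil => simp at hh
          | cons d r2 =>
            have hd : d = '\n' := by simpa using hh
            subst hd
            rw [pvSplit_crlf] at h
            injection h with h1 h2
            subst h1; exact List.nil_prefix
        · rw [pvSplit_break c rest hb (by tauto)] at h
          injection h with h1 h2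
          subst h1; exact List.nil_prefix
      · rw [pvSplit_cons c rest (by simpa using hb)] at h
        cases hX : pvSplit rest with
        | nil =>
          rw [hX] at h
          simp [pvPrepend] at h
          rw [← h.1]
          exact List.cons_prefix_cons.mpr ⟨rfl, List.nil_prefix⟩
        | cons l' ls' =>
          rw [hX] at h
          simp [pvPrepend] at h
          rw [← h.1]
          exact List.cons_prefix_cons.mpr ⟨rfl, ih rest (by simp at hs; omega) l' ls' hX⟩

theorem pvSplit_append (q : List Char) (hq : ∀ c ∈ q, pvIsB c = false) (t : List Char) :
    pvSplit (q ++ t) = pvPrepend q (pvSplit t) := by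
  induction q with
  | nil => simp [pvPrepend_nil]
  | cons c q' ih =>
    have hc : pvIsB c = false := hq c (by simp)
    have ih' := ih (fun x hx => hq x (by simp [hx]))
    rw [List.cons_append, pvSplit_cons c _ hc, ih',
        show (c :: q') = [c] ++ q' from rfl, pvPrepend_append]

-- fuel elimination for Chars.count
theorem pvCount_go (a : Char) (p : List Char) (fuel : Nat) :
    ∀ (s : List Char) (acc : Nat), s.length ≤ fuel →
      PySem.Chars.count.go (a :: p) fuel s acc = acc + pvCount a p s := by
  induction fuel with
  | zero =>
    intro s acc h
    have hnil : s = [] := by cases s with | nil => rfl | cons x t => simp at h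
    subst hnil
    simp [pvCount, PySem.Chars.count.go]
  | succ n ih =>
    intro s acc h
    cases s with
    | nil => simp [pvCount, PySem.Chars.count.go]
    | cons c t =>
      have step : PySem.Chars.count.go (a :: p) (n + 1) (c :: t) acc =
          if (a :: p).isPrefixOf (c :: t) then
            PySem.Chars.count.go (a :: p) n (List.drop (a :: p).length (c :: t)) (acc + 1)
          else PySem.Chars.count.go (a :: p) n t acc := rfl
      rw [step]
      have ht : t.length ≤ n := by simp at h; omega
      by_cases hp : (a :: p).isPrefixOf (c :: t)
      · rw [if_pos hp, show (a :: p).length = p.length + 1 from by simp, List.drop_succ_cons,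
            ih (List.drop p.length t) (acc + 1) (by simp; omega)]
        rw [pvCount, if_pos hp]
        omega
      · rw [if_neg hp, ih t acc ht, pvCount, if_neg hp]

theorem count_eq_pvCount (s : List Char) (a : Char) (p : List Char) :
    PySem.Chars.count s (a :: p) = pvCount a p s := by
  have : PySem.Chars.count s (a :: p) = PySem.Chars.count.go (a :: p) s.length s 0 := rfl
  rw [this, pvCount_go a p s.length s 0 le_rfl]; omega

theorem pvCount_sub_append (a : Char) (p l : List Char) :
    pvCount a p ((a :: p) ++ l) = 1 + pvCount a p l := by
  show pvCount a p (a :: (p ++ l)) = 1 + pvCount a p l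
  rw [pvCount, if_pos (List.isPrefixOf_iff_prefix.mpr (by exact List.prefix_append _ _)),
      List.drop_left]

theorem pvCount_cons_of_not_prefix (a c : Char) (p t : List Char)
    (h : ¬ (a :: p) <+: (c :: t)) : pvCount a p (c :: t) = pvCount a p t := by
  rw [pvCount, if_neg (fun hh => h (List.isPrefixOf_iff_prefix.mp hh))]

-- the crux: counting a break-free needle distributes over splitlines
theorem pvCount_splitlines (a : Char) (p : List Char) (hsub : ∀ c ∈ (a :: p), pvIsB c = false)
    (n : Nat) : ∀ s : List Char, s.length ≤ n →
    pvCount a p s = ((pvSplit s).map (pvCount a p)).sum := by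
  have ha : pvIsB a = false := hsub a (by simp)
  induction n with
  | zero =>
    intro s hs
    have hnil : s = [] := by cases s with | nil => rfl | cons x t => simp at hs
    subst hnil; simp [pvCount, pvSplit_nil]
  | succ n ih =>
    intro s hs
    cases s with
    | nil => simp [pvCount, pvSplit_nil]
    | cons c rest =>
      by_cases hp : (a :: p) <+: (c :: rest)
      · -- the needle matches at the front; it lies inside the first line
        obtain ⟨t, ht⟩ := hp
        have hlen : rest.length = p.length + t.length := by
          have := congrArg List.length ht
          simp at this; omega
        rw [← ht, pvCount_sub_append,
            pvSplit_append (a :: p) hsub t]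
        have iht : pvCount a p t = ((pvSplit t).map (pvCount a p)).sum :=
          ih t (by simp at hs; omega)
        cases hX : pvSplit t with
        | nil =>
          have htnil : t = [] := by
            cases t with
            | nil => rfl
            | cons x xs => exact absurd hX (pvSplit_ne_nil x xs)
          subst htnil
          simp [pvPrepend, pvCount]
        | cons l ls =>
          rw [hX] at iht
          simp only [pvPrepend, List.map_cons, List.sum_cons]
          rw [show (a :: p) ++ l = (a :: p) ++ l from rfl, pvCount_sub_append]
          simp at iht ⊢
          omega
      · -- no match at the front
        have hcount : pvCount a p (c :: rest) = pvCount a p rest :=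
          pvCount_cons_of_not_prefix a c p rest hp
        have ihr : pvCount a p rest = ((pvSplit rest).map (pvCount a p)).sum :=
          ih rest (by simp at hs; omega)
        by_cases hb : pvIsB c = true
        · by_cases hcr : c = '\r' ∧ rest.head? = some '\n'
          · obtain ⟨hc, hh⟩ := hcr
            subst hc
            cases rest with
            | nil => simp at hh
            | cons d r2 =>
              have hd : d = '\n' := by simpa using hh
              subst hd
              rw [pvSplit_crlf]
              have hnp : ¬ (a :: p) <+: ('\n' :: r2) := by
                intro hpre
                have : a = '\n' := (List.cons_prefix_cons.mp hpre).1
                rw [this] at ha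
                simp [pvIsB] at ha
              rw [hcount, pvCount_cons_of_not_prefix a _ p _ hnp]
              have ihr2 : pvCount a p r2 = ((pvSplit r2).map (pvCount a p)).sum :=
                ih r2 (by simp at hs; omega)
              simp [pvCount, ihr2]
          · rw [pvSplit_break c rest hb (by tauto), hcount, ihr]
            simp [pvCount]
        · rw [pvSplit_cons c rest (by simpa using hb), hcount, ihr]
          cases hX : pvSplit rest with
          | nil =>
            have hrnil : rest = [] := by
              cases rest with
              | nil => rfl
              | cons x xs => exact absurd hX (pvSplit_ne_nil x xs)
            subst hrnil
            have hnp : ¬ (a :: p) <+: [c] := hp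
            have e1 : pvPrepend [c] ([] : List (List Char)) = [[c]] := by simp [pvPrepend]
            rw [e1]
            simp only [List.map_nil, List.sum_nil, List.map_cons, List.sum_cons]
            rw [pvCount_cons_of_not_prefix a c p [] hnp]
            simp [pvCount]
          | cons l ls =>
            have hlpre : l <+: rest := pvSplit_first_prefix rest.length rest le_rfl l ls hX
            have hnp : ¬ (a :: p) <+: (c :: l) := by
              intro hpre
              exact hp (hpre.trans (List.cons_prefix_cons.mpr ⟨rfl, hlpre⟩))
            simp only [pvPrepend, List.map_cons, List.sum_cons]
            rw [show [c] ++ l = c :: l from rfl, pvCount_cons_of_not_prefix a c p l hnp]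

theorem pvCount_eq_zero_iff (a : Char) (p : List Char) (s : List Char) :
    pvCount a p s = 0 ↔ ¬ (a :: p) <:+: s := by
  suffices h : ∀ n (s : List Char), s.length ≤ n → (pvCount a p s = 0 ↔ ¬ (a :: p) <:+: s) from
    h s.length s le_rfl
  intro n
  induction n with
  | zero =>
    intro s hs
    have hnil : s = [] := by cases s with | nil => rfl | cons x t => simp at hs
    subst hnil
    simp [pvCount]
  | succ n ih =>
    intro s hs
    cases s with
    | nil => simp [pvCount]
    | cons c t =>
      by_cases hp : (a :: p) <+: (c :: t)
      · rw [pvCount, if_pos (List.isPrefixOf_iff_prefix.mpr hp)]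
        simp [hp.isInfix]
      · rw [pvCount_cons_of_not_prefix a c p t hp, ih t (by simp at hs; omega),
            List.infix_cons_iff]
        tauto

-- lowerChar facts
theorem lowerChar_toNat_of_upper (c : Char) (h : PySem.Chars.isupper c = true) :
    (PySem.Chars.lowerChar c).toNat = c.toNat + 32 ∧ 65 ≤ c.toNat ∧ c.toNat ≤ 90 := by
  have hb : 65 ≤ c.toNat ∧ c.toNat ≤ 90 := by
    simp only [PySem.Chars.isupper, Bool.and_eq_true, decide_eq_true_eq] at h
    obtain ⟨h1, h2⟩ := h
    rw [Char.le_def, UInt32.le_iff_toNat_le] at h1 h2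
    exact ⟨h1, h2⟩
  refine ⟨?_, hb.1, hb.2⟩
  rw [PySem.Chars.lowerChar, if_pos h, Char.toNat_ofNat,
      if_pos (Or.inl (by omega : c.toNat + 32 < 55296))]

theorem pvIsB_iff (c : Char) : pvIsB c = true ↔
    (c.toNat = 10 ∨ c.toNat = 13 ∨ c.toNat = 11 ∨ c.toNat = 12 ∨ c.toNat = 28 ∨
     c.toNat = 29 ∨ c.toNat = 30 ∨ c.toNat = 133 ∨ c.toNat = 8232 ∨ c.toNat = 8233) := by
  simp [pvIsB]; tauto

theorem pvIsB_lowerChar (c : Char) : pvIsB (PySem.Chars.lowerChar c) = pvIsB c := by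
  by_cases h : PySem.Chars.isupper c = true
  · obtain ⟨h1, h2, h3⟩ := lowerChar_toNat_of_upper c h
    rw [Bool.eq_iff_iff, pvIsB_iff, pvIsB_iff]
    omega
  · rw [PySem.Chars.lowerChar, if_neg h]

theorem lowerChar_ne_of_ne (c d : Char) (hd : pvIsB d = true) (h : c ≠ d) :
    PySem.Chars.lowerChar c ≠ d := by
  by_cases hu : PySem.Chars.isupper c = true
  · obtain ⟨h1, h2, h3⟩ := lowerChar_toNat_of_upper c hu
    intro e
    rw [pvIsB_iff] at hd
    rw [← e] at hd
    omega
  · rw [PySem.Chars.lowerChar, if_neg hu]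
    exact h

theorem pvPrepend_map (f : Char → Char) (p : List Char) (ls : List (List Char)) :
    (pvPrepend p ls).map (List.map f) = pvPrepend (p.map f) (ls.map (List.map f)) := by
  cases ls with
  | nil => by_cases hp : p = [] <;> simp [pvPrepend, hp]
  | cons l ls' => simp [pvPrepend]

theorem pvSplit_map_lower (n : Nat) : ∀ s : List Char, s.length ≤ n →
    pvSplit (s.map PySem.Chars.lowerChar) = (pvSplit s).map (List.map PySem.Chars.lowerChar) := by
  induction n with
  | zero =>
    intro s hs
    have hnil : s = [] := by cases s with | nil => rfl | cons x t => simp at hs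
    subst hnil
    simp [pvSplit_nil]
  | succ n ih =>
    intro s hs
    cases s with
    | nil => simp [pvSplit_nil]
    | cons c rest =>
      by_cases hb : pvIsB c = true
      · by_cases hcr : c = '\r' ∧ rest.head? = some '\n'
        · obtain ⟨hc, hh⟩ := hcr
          subst hc
          cases rest with
          | nil => simp at hh
          | cons d r2 =>
            have hd : d = '\n' := by simpa using hh
            subst hd
            have e1 : PySem.Chars.lowerChar '\r' = '\r' := by decide
            have e2 : PySem.Chars.lowerChar '\n' = '\n' := by decide
            simp only [List.map_cons, e1, e2]
            rw [pvSplit_crlf, pvSplit_crlf, ih r2 (by simp at hs; omega)]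
            simp
        · have h' : c ≠ '\r' ∨ rest.head? ≠ some '\n' := by tauto
          have h'' : PySem.Chars.lowerChar c ≠ '\r' ∨
              (rest.map PySem.Chars.lowerChar).head? ≠ some '\n' := by
            rcases h' with h' | h'
            · exact Or.inl (lowerChar_ne_of_ne c '\r' rfl h')
            · right
              cases rest with
              | nil => simp
              | cons d r2 =>
                have hd : d ≠ '\n' := by simpa using h'
                simpa using lowerChar_ne_of_ne d '\n' rfl hd
          simp only [List.map_cons]
          rw [pvSplit_break _ _ (by rw [pvIsB_lowerChar]; exact hb) h'',
              pvSplit_break c rest hb h', ih rest (by simp at hs; omega)]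
          simp
      · have hb' : pvIsB c = false := by simpa using hb
        simp only [List.map_cons]
        rw [pvSplit_cons _ _ (by rw [pvIsB_lowerChar]; exact hb'),
            pvSplit_cons c rest hb', ih rest (by simp at hs; omega), pvPrepend_map]
        simp

-- per-needle whole-string vs per-line equalities, Chars level
theorem count_lower_splitlines (a : Char) (p : List Char) (hsub : ∀ c ∈ (a :: p), pvIsB c = false)
    (s : List Char) :
    PySem.Chars.count (PySem.Chars.lower s) (a :: p) =
      ((pvSplit s).map (fun l => PySem.Chars.count (PySem.Chars.lower l) (a :: p))).sum := by
  rw [count_eq_pvCount,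
      show PySem.Chars.lower s = s.map PySem.Chars.lowerChar from rfl,
      pvCount_splitlines a p hsub (s.map PySem.Chars.lowerChar).length _ le_rfl,
      pvSplit_map_lower s.length s le_rfl, List.map_map]
  exact congrArg List.sum (List.map_congr_left fun l _ => by
    simp [Function.comp, count_eq_pvCount, PySem.Chars.lower])

theorem isIn_lower_splitlines (a : Char) (p : List Char) (hsub : ∀ c ∈ (a :: p), pvIsB c = false)
    (s : List Char) :
    PySem.Chars.isIn (a :: p) (PySem.Chars.lower s) =
      (pvSplit s).any (fun l => PySem.Chars.isIn (a :: p) (PySem.Chars.lower l)) := by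
  have key : ∀ t, (PySem.Chars.isIn (a :: p) t = true) ↔ pvCount a p t ≠ 0 := by
    intro t
    rw [PySem.Chars.isIn_iff_infix]
    constructor
    · intro h h0
      exact (pvCount_eq_zero_iff a p t).mp h0 h
    · intro h
      by_contra hn
      exact h ((pvCount_eq_zero_iff a p t).mpr hn)
  rw [Bool.eq_iff_iff, List.any_eq_true]
  simp only [key]
  have hsum : pvCount a p ((PySem.Chars.lower s)) =
      ((pvSplit s).map (fun l => pvCount a p (PySem.Chars.lower l))).sum := by
    rw [show PySem.Chars.lower s = s.map PySem.Chars.lowerChar from rfl,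
        pvCount_splitlines a p hsub (s.map PySem.Chars.lowerChar).length _ le_rfl,
        pvSplit_map_lower s.length s le_rfl, List.map_map]
    rfl
  rw [Ne, hsum, List.sum_eq_zero_iff]
  constructor
  · intro h
    by_contra hn
    push Not at hn
    exact h fun x hx => by
      obtain ⟨l, hl, rfl⟩ := List.mem_map.mp hx
      exact hn l hl
  · rintro ⟨l, hl, hne⟩ hall
    exact hne (hall _ (List.mem_map.mpr ⟨l, hl, rfl⟩))

-- Str-level: the B fold splits into four independent components
theorem pvFold_split (lines : List String) : ∀ (a b c d : Int),
    lines.foldl pvStep (a, b, c, d) =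
      (lines.foldl
        (fun dep line =>
          if PySem.Str.startswith (PySem.Str.strip line) "Successfully installed" then
            ((PySem.Str.split₀ (PySem.Str.strip
                (PySem.Str.replace line "Successfully installed" ""))).length : Int)
          else dep) a,
       b + ((lines.map (fun l => (PySem.Str.count (PySem.Str.lower l) ".whl" : Int))).sum),
       c + ((lines.map (fun l => (PySem.Str.count (PySem.Str.lower l) "building wheel" : Int))).sum),
       if lines.any (fun l => pvBuildSignals.any (fun s => PySem.Str.isIn s (PySem.Str.lower l)))
         then 1 else d) := by
  have step1 : ∀ (st : Int × Int × Int × Int) (l : String),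
      (pvStep st l).1 =
        if PySem.Str.startswith (PySem.Str.strip l) "Successfully installed" then
          ((PySem.Str.split₀ (PySem.Str.strip
              (PySem.Str.replace l "Successfully installed" ""))).length : Int)
        else st.1 := by
    intro st l
    unfold pvStep
    by_cases h : PySem.Str.startswith (PySem.Str.strip l) "Successfully installed" = true
    · rw [if_pos h]; try rw [if_pos h]
    · rw [if_neg h]; try rw [if_neg h]
  have step2 : ∀ (st : Int × Int × Int × Int) (l : String),
      (pvStep st l).2.1 = st.2.1 + (PySem.Str.count (PySem.Str.lower l) ".whl" : Int) := by
    intro st l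
    unfold pvStep
    by_cases h : PySem.Str.startswith (PySem.Str.strip l) "Successfully installed" = true
    · rw [if_pos h]; try rw [if_pos h]
    · rw [if_neg h]; try rw [if_neg h]
  have step3 : ∀ (st : Int × Int × Int × Int) (l : String),
      (pvStep st l).2.2.1 = st.2.2.1 + (PySem.Str.count (PySem.Str.lower l) "building wheel" : Int) := by
    intro st l
    unfold pvStep
    by_cases h : PySem.Str.startswith (PySem.Str.strip l) "Successfully installed" = true
    · rw [if_pos h]; try rw [if_pos h]
    · rw [if_neg h]; try rw [if_neg h]
  have step4 : ∀ (st : Int × Int × Int × Int) (l : String),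
      (pvStep st l).2.2.2 =
        if pvBuildSignals.any (fun s => PySem.Str.isIn s (PySem.Str.lower l)) then 1
        else st.2.2.2 := by
    intro st l
    unfold pvStep
    by_cases h : PySem.Str.startswith (PySem.Str.strip l) "Successfully installed" = true
    · rw [if_pos h]; try rw [if_pos h]
    · rw [if_neg h]; try rw [if_neg h]
  induction lines with
  | nil =>
    intro a b c d
    simp only [List.foldl_nil, List.map_nil, List.sum_nil, List.any_nil, add_zero,
      Bool.false_eq_true, if_false]
  | cons l ls ih =>
    intro a b c d
    simp only [List.foldl_cons, List.map_cons, List.sum_cons, List.any_cons]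
    have heta : ∀ z : Int × Int × Int × Int, z = (z.1, z.2.1, z.2.2.1, z.2.2.2) :=
      fun z => rfl
    rw [heta (pvStep (a, b, c, d) l), step1, step2, step3, step4, ih]
    refine congrArg₂ _ rfl (congrArg₂ _ ?_ (congrArg₂ _ ?_ ?_))
    · simp only []
      omega
    · simp only []
      omega
    · by_cases hp : pvBuildSignals.any (fun s => PySem.Str.isIn s (PySem.Str.lower l)) = true
      · simp only [hp, if_true, Bool.true_or, ite_self]
      · simp only [Bool.not_eq_true] at hp
        simp only [hp, Bool.false_eq_true, if_false, Bool.false_or]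

theorem any_swap {α β : Type} (xs : List α) (ys : List β) (p : α → β → Bool) :
    xs.any (fun x => ys.any (fun y => p x y)) = ys.any (fun y => xs.any (fun x => p x y)) := by
  rw [Bool.eq_iff_iff]
  simp only [List.any_eq_true]
  constructor
  · rintro ⟨x, hx, y, hy, h⟩; exact ⟨y, hy, x, hx, h⟩
  · rintro ⟨y, hy, x, hx, h⟩; exact ⟨x, hx, y, hy, h⟩

theorem any_congr_mem {α : Type} (l : List α) (p q : α → Bool) (h : ∀ x ∈ l, p x = q x) :
    l.any p = l.any q := by
  induction l with
  | nil => rfl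
  | cons x xs ih =>
    simp only [List.any_cons, h x (by simp), ih (fun y hy => h y (by simp [hy]))]

-- whole lowered string count = sum of per-line lowered counts, Str level
theorem str_count_lines (pip sub : String) (a : Char) (p : List Char)
    (hsub : sub.toList = a :: p) (hbr : ∀ c ∈ (a :: p), pvIsB c = false) :
    (PySem.Str.count (PySem.Str.lower pip) sub : Int) =
      ((PySem.Str.splitlines pip).map
        (fun l => (PySem.Str.count (PySem.Str.lower l) sub : Int))).sum := by
  have h0 : PySem.Str.count (PySem.Str.lower pip) sub =
      PySem.Chars.count (PySem.Chars.lower pip.toList) (a :: p) := by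
    rw [PySem.Str.count, PySem.Str.toList_lower, hsub]
  have hl : PySem.Str.splitlines pip = (pvSplit pip.toList).map String.ofList := by
    rw [PySem.Str.splitlines, splitlines_eq_go]; rfl
  rw [h0, count_lower_splitlines a p hbr pip.toList, hl, List.map_map,
      Nat.cast_list_sum, List.map_map]
  exact congrArg List.sum (List.map_congr_left fun l _ => by
    simp [Function.comp, PySem.Str.count, PySem.Str.toList_lower, hsub])

-- whole lowered signal search = any over lines, Str level
set_option maxRecDepth 8192 in
set_option maxHeartbeats 1000000 in
theorem str_flag_lines (pip : String) :
    pvMatch pip pvBuildSignals =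
      (PySem.Str.splitlines pip).any
        (fun l => pvBuildSignals.any (fun s => PySem.Str.isIn s (PySem.Str.lower l))) := by
  have hprop : ∀ sg ∈ pvBuildSignals,
      sg.toList ≠ [] ∧ sg.toList.all (fun c => !(pvIsB c)) = true := by decide
  have hsig : ∀ sg ∈ pvBuildSignals,
      PySem.Str.isIn sg (PySem.Str.lower pip) =
        (pvSplit pip.toList).any (fun l => PySem.Chars.isIn sg.toList (PySem.Chars.lower l)) := by
    intro sg hsg
    obtain ⟨h1, h2⟩ := hprop sg hsg
    cases hc : sg.toList with
    | nil => exact absurd hc h1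
    | cons a p =>
      have hbr : ∀ c ∈ (a :: p), pvIsB c = false := by
        intro c hcmem
        have := List.all_eq_true.mp h2 c (hc ▸ hcmem)
        simpa using this
      rw [PySem.Str.isIn, PySem.Str.toList_lower, hc, isIn_lower_splitlines a p hbr]
  have hl : PySem.Str.splitlines pip = (pvSplit pip.toList).map String.ofList := by
    rw [PySem.Str.splitlines, splitlines_eq_go]; rfl
  unfold pvMatch
  rw [any_congr_mem _ _ _ hsig, any_swap, hl, List.any_map]
  refine (any_congr_mem _ _ _ (fun l _ => ?_)).symm
  show (fun l => pvBuildSignals.any (fun s => PySem.Str.isIn s (PySem.Str.lower l))) (String.ofList l) = _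
  refine any_congr_mem _ _ _ (fun sg _ => ?_)
  rw [PySem.Str.isIn, PySem.Str.toList_lower, String.toList_ofList]

set_option maxRecDepth 8192 in
theorem whl_toList : ".whl".toList = '.' :: ['w', 'h', 'l'] := by decide

set_option maxRecDepth 8192 in
theorem whl_nobreak : ∀ c ∈ ('.' :: ['w', 'h', 'l']), pvIsB c = false := by
  intro c hc
  simpa using List.all_eq_true.mp
    (show ('.' :: ['w', 'h', 'l']).all (fun c => !(pvIsB c)) = true by decide) c hc

set_option maxRecDepth 8192 in
theorem bw_toList : "building wheel".toList =
    'b' :: ['u', 'i', 'l', 'd', 'i', 'n', 'g', ' ', 'w', 'h', 'e', 'e', 'l'] := by decide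

set_option maxRecDepth 8192 in
theorem bw_nobreak :
    ∀ c ∈ ('b' :: ['u', 'i', 'l', 'd', 'i', 'n', 'g', ' ', 'w', 'h', 'e', 'e', 'l']),
      pvIsB c = false := by
  intro c hc
  simpa using List.all_eq_true.mp
    (show ('b' :: ['u', 'i', 'l', 'd', 'i', 'n', 'g', ' ', 'w', 'h', 'e', 'e', 'l']).all
        (fun c => !(pvIsB c)) = true by decide) c hc

-- ===== VERDICT =====
theorem parse_dep_surface_spec : Claim_equal_parse_dep_surface := by
  intro pip _
  unfold Spec_parse_dep_surface parse_dep_surface parse_dep_surface_alt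
  rw [pvFold_split,
      str_count_lines pip ".whl" '.' ['w', 'h', 'l'] whl_toList whl_nobreak,
      str_count_lines pip "building wheel" 'b'
        ['u', 'i', 'l', 'd', 'i', 'n', 'g', ' ', 'w', 'h', 'e', 'e', 'l'] bw_toList bw_nobreak,
      str_flag_lines pip, zero_add, zero_add]
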